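-- pv_equiv track=rewrite | github.com/CamNagle24/Wordle | Code/wordle.py | no_letters
-- ===== SOURCE A (Python) =====
-- def no_letters(clues):
--     """Takes a list of guesses taken clues recieved. It returns a string"""
--     clues = dict(clues)
--     list_grey_output = []
--     list_yellow_green_output = []
--     str_grey_output = ""
--     #Go throgh each clue and if a letter is grey and not already in the lists append it
--     for i in clues:
--         k = 0
--         for j in clues[i]:
--                 guess = i
--                 if(j == "grey" and guess[k] not in list_grey_output and guess[k] not in list_yellow_green_output):
--                     list_grey_output.append(guess[k])
--                     k = k + 1
--                 else:
--                     list_yellow_green_output.append(guess[k])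
--                     k = k + 1
--     list_grey_output = sorted(list_grey_output)
--     #Make a string with the list we have of the known grey letters then return it
--     for i in range(len(list_grey_output)):
--         str_grey_output = str_grey_output + list_grey_output[i]
--     return str_grey_output
-- ===== SOURCE B (Python) =====
-- def no_letters(clues):
--     """Takes a list of guesses taken clues recieved. It returns a string"""
--     events = [(word[k], color)
--               for word, colors in dict(clues).items()
--               for k, color in enumerate(colors)]
--     stream = [letter for letter, _ in events]
--     grey = [letter for letter in set(stream)
--             if events[stream.index(letter)][1] == "grey"]
--     return ''.join(sorted(grey))
-- ===== Notes on version B (the rewrite author's own statement) =====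
-- stated objective: alternative
-- what changed: Instead of A's single stateful pass keeping two complementary membership lists, B flattens all clues into one flat (letter, color) event stream in staged comprehensions and then, for each distinct letter, runs a fresh stream.index scan to look up its first event's color, keeping the letter if that color is 'grey'.
import Mathlib
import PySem

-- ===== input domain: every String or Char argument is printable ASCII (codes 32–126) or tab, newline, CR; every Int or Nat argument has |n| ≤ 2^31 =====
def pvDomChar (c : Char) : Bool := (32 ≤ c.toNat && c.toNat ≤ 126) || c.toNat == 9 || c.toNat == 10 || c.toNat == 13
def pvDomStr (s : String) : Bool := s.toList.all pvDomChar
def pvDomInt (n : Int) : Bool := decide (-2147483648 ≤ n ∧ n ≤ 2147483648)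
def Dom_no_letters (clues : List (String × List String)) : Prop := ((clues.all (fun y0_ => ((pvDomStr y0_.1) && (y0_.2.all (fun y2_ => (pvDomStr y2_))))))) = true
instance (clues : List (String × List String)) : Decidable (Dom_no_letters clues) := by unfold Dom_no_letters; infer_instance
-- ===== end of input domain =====

-- B flattens the clues into one flat (letter, color) event stream and keeps each distinct
-- letter whose first event (found by a fresh stream.index scan) is "grey": a staged
-- search-per-letter decomposition instead of A's single stateful pass with two
-- complementary membership lists. Objective: alternative structure, same cost class.

-- ===== PORT A =====
-- inner loop body of A: state (k, list_grey_output, list_yellow_green_output), clue color j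
def pvAStep (w : List Char) (st : Int × List Char × List Char) (j : String) : Int × List Char × List Char :=
  let g := (PySem.List.pyGet? w st.1).getD ' '   -- guess[k]; the IndexError case (none) is excluded by Pre_
  if j == "grey" && !(st.2.1.contains g) && !(st.2.2.contains g) then
    (st.1 + 1, st.2.1 ++ [g], st.2.2)
  else
    (st.1 + 1, st.2.1, st.2.2 ++ [g])

def no_letters (clues : List (String × List String)) : String :=
  let d := PySem.Dict.ofList clues
  let fin := d.items.foldl
    (fun (acc : List Char × List Char) p => (p.2.foldl (pvAStep p.1.toList) ((0 : Int), acc.1, acc.2)).2)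
    ([], [])
  let sortedGrey := PySem.List.sorted fin.1 (fun x => x) false
  String.ofList ((PySem.List.pyRange 0 (sortedGrey.length : Int) 1).foldl
    (fun s i => s ++ [PySem.List.pyGetD sortedGrey i ' ']) [])

-- ===== PORT B =====
def no_letters_alt (clues : List (String × List String)) : String :=
  -- events = [(word[k], color) for word, colors in dict(clues).items() for k, color in enumerate(colors)]
  let events := (PySem.Dict.ofList clues).items.flatMap
    (fun p => (PySem.List.enumerate p.2).map
      (fun kc => ((PySem.List.pyGet? p.1.toList kc.1).getD ' ', kc.2)))   -- word[k]; IndexError excluded by Pre_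
  -- stream = [letter for letter, _ in events]
  let stream := events.map (fun e => e.1)
  -- grey = [letter for letter in set(stream) if events[stream.index(letter)][1] == "grey"]
  let grey := (PySem.Set.ofList stream).filter (fun letter =>
    match PySem.List.index? stream letter with
    | some i => decide ((PySem.List.pyGet? events (i : Int)).map (fun e => e.2) = some "grey")
    | none => false)
  -- ''.join(sorted(grey))
  String.ofList (PySem.List.sorted grey (fun x => x) false)

-- ===== PRECONDITION & SPEC =====
-- Pre_ excludes exactly the inputs where Python raises IndexError: some entry of dict(clues)
-- has more colors than the guess word has letters (guess[k] / word[k] out of range).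
def Pre_no_letters (clues : List (String × List String)) : Prop :=
  ∀ p ∈ (PySem.Dict.ofList clues).items, p.2.length ≤ p.1.toList.length
instance (clues : List (String × List String)) : Decidable (Pre_no_letters clues) := by unfold Pre_no_letters; infer_instance
def pvWitness_no_letters : (List (String × List String)) := [("abc", ["grey", "green", "grey"]), ("bd", ["yellow", "grey"])]
def Spec_no_letters (clues : List (String × List String)) (out : String) : Prop := out = no_letters_alt clues
instance (clues : List (String × List String)) (out : String) : Decidable (Spec_no_letters clues out) := by unfold Spec_no_letters; infer_instance

-- ===== CLAIM (what is proved, stated in full; the proofs are below) =====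
def Claim_equal_no_letters : Prop := ∀ (clues : List (String × List String)), Dom_no_letters clues → Pre_no_letters clues → Spec_no_letters clues (no_letters clues)

-- ===== LEMMAS AND PROOFS =====

-- the per-event body of A's inner loop, with the index bookkeeping stripped off
def pvStep (st : List Char × List Char) (e : Char × String) : List Char × List Char :=
  if e.2 == "grey" && !(st.1.contains e.1) && !(st.2.contains e.1) then
    (st.1 ++ [e.1], st.2)
  else
    (st.1, st.2 ++ [e.1])

-- "the first event of letter l in es is grey", find?-style
def pvPred (es : List (Char × String)) (l : Char) : Bool :=
  decide ((es.find? (fun e => e.1 == l)).map (fun e => e.2) = some "grey")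

-- B's filter test (index? + pyGet?) computes pvPred
theorem pvPredB_eq (es : List (Char × String)) (l : Char) :
    (match PySem.List.index? (es.map (fun e => e.1)) l with
      | some i => decide ((PySem.List.pyGet? es (i : Int)).map (fun e => e.2) = some "grey")
      | none => false) = pvPred es l := by
  induction es with
  | nil => simp [pvPred]
  | cons e es ih =>
    by_cases h : e.1 = l
    · rw [List.map_cons, h, PySem.List.index?_cons_self]
      simp [pvPred, h, PySem.List.pyGet?, PySem.List.pyIdx?]
    · rw [List.map_cons, PySem.List.index?_cons_of_ne _ h]
      have hfind : pvPred (e :: es) l = pvPred es l := by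
        simp [pvPred, h]
      rw [hfind, ← ih]
      cases hi : PySem.List.index? (es.map (fun e => e.1)) l with
      | none => simp
      | some i =>
        simp only [Option.map]
        have h1 : ((i + 1 : Nat) : Int) = ((i + 1 : Nat) : Int) := rfl
        rw [show ((i + 1 : Nat) : Int) = (((i + 1 : Nat) : Nat) : Int) from rfl]
        rw [PySem.List.pyGet?_natCast, PySem.List.pyGet?_natCast]
        simp

-- flattening of A's inner loop: the fold with explicit index k equals pvStep over the events of one word
theorem pvInner (w : List Char) (cs : List String) :
    ∀ (k : Int) (grey yg : List Char),
    (cs.foldl (pvAStep w) (k, grey, yg)).2 =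
      ((PySem.List.enumerate cs k).map
        (fun kc => ((PySem.List.pyGet? w kc.1).getD ' ', kc.2))).foldl pvStep (grey, yg) := by
  induction cs with
  | nil => intro k grey yg; simp [PySem.List.enumerate_nil]
  | cons c cs ih =>
    intro k grey yg
    rw [PySem.List.enumerate_cons]
    simp only [List.map_cons, List.foldl_cons]
    have hA : pvAStep w (k, grey, yg) c =
        (k + 1, pvStep (grey, yg) ((PySem.List.pyGet? w k).getD ' ', c)) := by
      simp only [pvAStep, pvStep]
      split <;> rfl
    rw [hA, ih]

-- flattening of A's outer loop into one fold over the flat event stream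
theorem pvOuter (ps : List (String × List String)) :
    ∀ (grey yg : List Char),
    ps.foldl (fun (acc : List Char × List Char) p =>
        (p.2.foldl (pvAStep p.1.toList) ((0 : Int), acc.1, acc.2)).2) (grey, yg) =
      (ps.flatMap (fun p => (PySem.List.enumerate p.2).map
        (fun kc => ((PySem.List.pyGet? p.1.toList kc.1).getD ' ', kc.2)))).foldl pvStep (grey, yg) := by
  induction ps with
  | nil => intro grey yg; simp
  | cons p ps ih =>
    intro grey yg
    rw [List.flatMap_cons, List.foldl_append, List.foldl_cons]
    rw [← pvInner p.1.toList p.2 0 grey yg, ih]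

-- the key invariant, by induction from the back of the event stream:
-- A's grey list is exactly the distinct letters (in first-occurrence order) whose first event is grey,
-- and grey ∪ yellow-green is exactly the set of letters seen so far.
theorem pvMain (es : List (Char × String)) :
    (es.foldl pvStep ([], [])).1 =
      (PySem.Set.ofList (es.map (fun e => e.1))).filter (pvPred es) ∧
    ∀ c : Char, (c ∈ (es.foldl pvStep ([], [])).1 ∨ c ∈ (es.foldl pvStep ([], [])).2) ↔
      c ∈ es.map (fun e => e.1) := by
  induction es using List.reverseRecOn with
  | nil => simp [PySem.Set.ofList]
  | append_singleton es e ih =>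
    obtain ⟨ih1, ih2⟩ := ih
    rw [List.foldl_append, List.foldl_cons, List.foldl_nil]
    set G := (es.foldl pvStep ([], [])).1 with hG
    set Y := (es.foldl pvStep ([], [])).2 with hY
    have hfilter_congr : (PySem.Set.ofList (es.map (fun e => e.1))).filter (pvPred (es ++ [e])) =
        (PySem.Set.ofList (es.map (fun e => e.1))).filter (pvPred es) := by
      apply List.filter_congr
      intro x hx
      have hxs : x ∈ es.map (fun e => e.1) := (PySem.Set.mem_ofList _ _).mp hx
      obtain ⟨p, hp, hpx⟩ := List.mem_map.mp hxs
      have hsome : (es.find? (fun e => e.1 == x)).isSome := by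
        rw [List.find?_isSome]; exact ⟨p, hp, by simp [hpx]⟩
      obtain ⟨v, hv⟩ := Option.isSome_iff_exists.mp hsome
      simp only [pvPred, List.find?_append, hv, Option.or]
    have hset : PySem.Set.ofList ((es ++ [e]).map (fun e => e.1)) =
        PySem.Set.add (PySem.Set.ofList (es.map (fun e => e.1))) e.1 := by
      rw [List.map_append, PySem.Set.ofList_eq_foldl, List.foldl_append,
        ← PySem.Set.ofList_eq_foldl]
      rfl
    by_cases hmem : e.1 ∈ es.map (fun e => e.1)
    · -- a letter already seen: A appends to yellow-green, B's set and filter are unchanged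
      have hGY : e.1 ∈ G ∨ e.1 ∈ Y := (ih2 e.1).mpr hmem
      have hstep : pvStep (G, Y) e = (G, Y ++ [e.1]) := by
        simp only [pvStep]
        rcases hGY with h | h <;> simp [h]
      rw [hstep]
      have haddset : PySem.Set.add (PySem.Set.ofList (es.map (fun e => e.1))) e.1 =
          PySem.Set.ofList (es.map (fun e => e.1)) := by
        simp only [PySem.Set.add]
        have : (PySem.Set.ofList (es.map (fun e => e.1))).contains e.1 := by
          simp [PySem.Set.mem_ofList, hmem]
        rw [this]
        simp
      refine ⟨?_, ?_⟩
      · rw [hset, haddset, hfilter_congr, ih1]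
      · intro c
        have h2 := ih2 c
        by_cases hce : c = e.1
        · subst hce
          simp only [List.map_append, List.mem_append, List.mem_singleton] at h2 ⊢
          simp [hmem]
        · simp only [List.map_append, List.mem_append, List.mem_singleton,
            List.map_cons, List.map_nil] at h2 ⊢
          simp [hce] at *
          tauto
    · -- a fresh letter: its first event is this one
      have hnG : e.1 ∉ G := fun h => hmem ((ih2 e.1).mp (Or.inl h))
      have hnY : e.1 ∉ Y := fun h => hmem ((ih2 e.1).mp (Or.inr h))
      have hnone : es.find? (fun x => x.1 == e.1) = none := by
        rw [List.find?_eq_none]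
        intro p hp
        simp only [beq_iff_eq]
        intro hpe
        exact hmem (List.mem_map.mpr ⟨p, hp, hpe⟩)
      have hpredfresh : pvPred (es ++ [e]) e.1 = decide (e.2 = "grey") := by
        simp only [pvPred, List.find?_append, hnone, Option.or, List.find?_cons,
          beq_self_eq_true]
        simp
      have haddset : PySem.Set.add (PySem.Set.ofList (es.map (fun e => e.1))) e.1 =
          PySem.Set.ofList (es.map (fun e => e.1)) ++ [e.1] := by
        simp only [PySem.Set.add]
        have : (PySem.Set.ofList (es.map (fun e => e.1))).contains e.1 = false := by
          simp [PySem.Set.mem_ofList, hmem]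
        rw [this]
        simp
      have hmemside : ∀ c : Char,
          (c ∈ G ∨ c ∈ Y ++ [e.1]) ↔ c ∈ (es ++ [e]).map (fun e => e.1) := by
        intro c
        have h2 := ih2 c
        simp only [List.map_append, List.mem_append, List.mem_singleton,
          List.map_cons, List.map_nil] at h2 ⊢
        tauto
      by_cases hj : e.2 = "grey"
      · have hstep : pvStep (G, Y) e = (G ++ [e.1], Y) := by
          simp only [pvStep]
          simp [hj, hnG, hnY]
        rw [hstep]
        refine ⟨?_, ?_⟩
        · rw [hset, haddset, List.filter_append, hfilter_congr, ih1]
          simp [hpredfresh, hj]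
        · intro c
          have h2 := ih2 c
          simp only [List.map_append, List.mem_append, List.mem_singleton,
            List.map_cons, List.map_nil] at h2 ⊢
          tauto
      · have hstep : pvStep (G, Y) e = (G, Y ++ [e.1]) := by
          simp only [pvStep]
          simp [hj]
        rw [hstep]
        refine ⟨?_, hmemside⟩
        rw [hset, haddset, List.filter_append, hfilter_congr, ih1]
        simp [hpredfresh, hj]

-- ===== VERDICT (by name: the statement is the Claim_ definition above) =====
theorem no_letters_spec : Claim_equal_no_letters := by
  intro clues _ _
  unfold Spec_no_letters no_letters no_letters_alt
  dsimp only
  rw [pvOuter]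
  set es := ((PySem.Dict.ofList clues).items.flatMap (fun p => (PySem.List.enumerate p.2).map
    (fun kc => ((PySem.List.pyGet? p.1.toList kc.1).getD ' ', kc.2)))) with hes
  obtain ⟨h1, _⟩ := pvMain es
  rw [h1]
  have hpred : (fun letter =>
      match PySem.List.index? (es.map (fun e => e.1)) letter with
      | some i => decide ((PySem.List.pyGet? es (i : Int)).map (fun e => e.2) = some "grey")
      | none => false) = pvPred es := by
    funext l; exact pvPredB_eq es l
  rw [hpred]
  congr 1
  rw [PySem.List.foldl_pyRange_zero_pyGetD' _ ' ' (fun s x => s ++ [x]) []]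
  rw [PySem.List.foldl_append_singleton]
  simp
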